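-- pv_equiv track=rewrite | github.com/cjclarkcord-a11y/coding-tools | copypaste/copypaste/normalizer.py | _strip_comments_matlab
-- ===== SOURCE A (Python) =====
-- def _strip_comments_matlab(line: str) -> str:
--     """Remove MATLAB % comments while respecting strings."""
--     in_str = False
--     for i, ch in enumerate(line):
--         if ch == "'" and not in_str:
--             in_str = True
--         elif ch == "'" and in_str:
--             in_str = False
--         elif ch == "%" and not in_str:
--             return line[:i]
--     return line
-- ===== SOURCE B (Python) =====
-- def _strip_comments_matlab(line: str) -> str:
--     """Remove MATLAB % comments while respecting strings."""
--     offset = 0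
--     outside = True
--     for seg in line.split("'"):
--         if outside:
--             p = seg.find("%")
--             if p != -1:
--                 return line[:offset + p]
--         offset += len(seg) + 1
--         outside = not outside
--     return line
-- ===== Notes on version B (the rewrite author's own statement) =====
-- stated objective: faster
-- what changed: Replaces A's per-character scan with an in-string flag by splitting the line on the quote character and searching for the comment character only in the even-indexed (outside-string) segments while tracking a running offset; the scan moves into C-level str.split/str.find.
import Mathlib
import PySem

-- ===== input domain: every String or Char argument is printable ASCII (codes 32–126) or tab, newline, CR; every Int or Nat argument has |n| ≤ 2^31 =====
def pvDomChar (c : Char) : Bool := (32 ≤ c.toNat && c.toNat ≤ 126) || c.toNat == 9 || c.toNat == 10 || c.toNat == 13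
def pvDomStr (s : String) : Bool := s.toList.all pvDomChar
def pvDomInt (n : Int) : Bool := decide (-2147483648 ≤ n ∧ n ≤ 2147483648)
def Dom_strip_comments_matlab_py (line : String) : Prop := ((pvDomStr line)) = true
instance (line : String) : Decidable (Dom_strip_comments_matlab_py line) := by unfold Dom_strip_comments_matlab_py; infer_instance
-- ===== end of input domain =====

-- B replaces A's per-character scan carrying an in-string flag by splitting the line on the
-- quote character and examining only the even-indexed (outside-string) segments.

-- ===== PORT A =====
-- A's for-loop over enumerate(line): the early 'return line[:i]' is modelled by returning
-- 'some i' (the cut position) and slicing afterwards; 'none' = the loop fell through.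
def stripAGo : List Char → Bool → Nat → Option Nat
  | [], _, _ => none
  | c :: cs, inStr, i =>
    if c == '\'' && !inStr then stripAGo cs true (i + 1)
    else if c == '\'' && inStr then stripAGo cs false (i + 1)
    else if c == '%' && !inStr then some i
    else stripAGo cs inStr (i + 1)

def strip_comments_matlab_py (line : String) : String :=
  match stripAGo line.toList false 0 with
  | some i => String.ofList (line.toList.take i)   -- line[:i] with 0 ≤ i
  | none => line

-- ===== PORT B =====
-- Source B's for-loop over line.split("'") with (offset, outside) state; seg.find("%") on the
-- single character '%' is List.findIdx? (some p ↔ find returns p, none ↔ find returns -1).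
def stripBGo : List (List Char) → Nat → Bool → Option Nat
  | [], _, _ => none
  | seg :: rest, offset, outside =>
    if outside then
      match seg.findIdx? (· == '%') with
      | some p => some (offset + p)
      | none => stripBGo rest (offset + seg.length + 1) (!outside)
    else stripBGo rest (offset + seg.length + 1) (!outside)

def strip_comments_matlab_py_alt (line : String) : String :=
  -- line.split("'") for the one-character separator is exactly List.splitOn '\''
  match stripBGo (line.toList.splitOn '\'') 0 true with
  | some n => String.ofList (line.toList.take n)   -- line[:offset+p] with 0 ≤ offset+p
  | none => line

-- ===== PRECONDITION & SPEC =====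
def Spec_strip_comments_matlab_py (line : String) (out : String) : Prop := out = strip_comments_matlab_py_alt line
instance (line : String) (out : String) : Decidable (Spec_strip_comments_matlab_py line out) := by unfold Spec_strip_comments_matlab_py; infer_instance

-- ===== CLAIM (what is proved, stated in full; the proofs are below) =====
def Claim_equal_strip_comments_matlab_py : Prop := ∀ (line : String), Dom_strip_comments_matlab_py line → Spec_strip_comments_matlab_py line (strip_comments_matlab_py line)

-- ===== LEMMAS AND PROOFS =====

-- The heart of the equivalence: A's scan from position i with flag inStr computes the same
-- cut position as B's segment loop over the quote-split of the rest, with outside = !inStr.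
theorem stripAGo_eq_stripBGo (cs : List Char) : ∀ (i : Nat) (inStr : Bool),
    stripAGo cs inStr i = stripBGo (cs.splitOnP (· == '\'')) i (!inStr) := by
  induction cs with
  | nil =>
    intro i inStr
    cases inStr <;> simp [stripAGo, List.splitOnP_nil, stripBGo, List.findIdx?_nil]
  | cons c cs ih =>
    intro i inStr
    by_cases hq : c = '\''
    · subst hq
      rw [List.splitOnP_cons]
      cases inStr <;>
        simp [stripAGo, stripBGo, List.findIdx?_nil, ih (i + 1)]
    · obtain ⟨s, rest, hsplit⟩ : ∃ s rest, cs.splitOnP (· == '\'') = s :: rest := by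
        cases h : cs.splitOnP (· == '\'') with
        | nil => exact absurd h (List.splitOnP_ne_nil _ _)
        | cons s rest => exact ⟨s, rest, rfl⟩
      rw [List.splitOnP_cons]
      have hq' : (c == '\'') = false := by simp [hq]
      rw [hq']
      simp only [Bool.false_eq_true, if_false, hsplit, List.modifyHead]
      cases inStr with
      | true =>
        simp only [stripAGo, hq', Bool.false_and, Bool.not_true, Bool.and_false,
          Bool.false_eq_true, if_false]
        rw [ih (i + 1) true, hsplit]
        simp only [stripBGo, Bool.not_true, Bool.not_false, Bool.false_eq_true, if_false,
          List.length_cons]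
        congr 1
        omega
      | false =>
        by_cases hp : c = '%'
        · subst hp
          simp [stripAGo, stripBGo, List.findIdx?_cons]
        · have hp' : (c == '%') = false := by simp [hp]
          simp only [stripAGo, hq', hp', Bool.false_and, Bool.false_eq_true, if_false,
            stripBGo, Bool.not_false, if_true, List.findIdx?_cons]
          rw [ih (i + 1) false, hsplit]
          cases hfind : s.findIdx? (· == '%') with
          | some p =>
            simp only [stripBGo, Bool.not_false, hfind, Option.map_some, if_true,
              Option.some.injEq]
            omega
          | none =>
            simp only [stripBGo, Bool.not_false, hfind, Option.map_none, if_true,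
              List.length_cons]
            congr 1
            omega

theorem main_eq (line : String) :
    strip_comments_matlab_py line = strip_comments_matlab_py_alt line := by
  unfold strip_comments_matlab_py strip_comments_matlab_py_alt
  rw [List.splitOn, show (true : Bool) = !false from rfl,
    ← stripAGo_eq_stripBGo line.toList 0 false]

-- ===== VERDICT (by name: the statement is the Claim_ definition above) =====
theorem strip_comments_matlab_py_spec : Claim_equal_strip_comments_matlab_py := by
  intro line _
  unfold Spec_strip_comments_matlab_py
  exact main_eq line
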